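-- pv_equiv track=rewrite | github.com/springfall2008/predheat | apps/predheat/predheat.py | clean_incrementing_reverse
-- ===== SOURCE A (Python) =====
-- def clean_incrementing_reverse(data, max_increment=0):
--     """
--     Cleanup an incrementing sensor data that runs backwards in time to remove the
--     resets (where it goes back to 0) and make it always increment
--     """
--     new_data = {}
--     length = max(data) + 1
--
--     increment = 0
--     last = data[length - 1]
--
--     for index in range(0, length):
--         rindex = length - index - 1
--         nxt = data.get(rindex, last)
--         if nxt >= last:
--             if (max_increment > 0) and ((nxt - last) > max_increment):
--                 # Smooth out big spikes
--                 pass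
--             else:
--                 increment += nxt - last
--         last = nxt
--         new_data[rindex] = increment
--
--     return new_data
-- ===== SOURCE B (Python) =====
-- def clean_incrementing_reverse(data, max_increment=0):
--     """Two-pass cleanup: fill missing samples backwards, then prefix-sum the clamped deltas."""
--     length = max(data) + 1
--     # Pass 1: filled values at rindex = length-1 .. 0, propagating the last seen value.
--     prev = data[length - 1]
--     vals = []
--     for rindex in range(length - 1, -1, -1):
--         prev = data.get(rindex, prev)
--         vals.append(prev)
--     # Pass 2: clamped per-step deltas, then their running sums keyed high-to-low.
--     deltas = [
--         (b - a) if b >= a and (max_increment <= 0 or b - a <= max_increment) else 0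
--         for a, b in zip([data[length - 1]] + vals, vals)
--     ]
--     new_data = {}
--     total = 0
--     for i, d in enumerate(deltas):
--         total += d
--         new_data[length - 1 - i] = total
--     return new_data
-- ===== Notes on version B (the rewrite author's own statement) =====
-- stated objective: alternative
-- what changed: A fuses filling, gating and accumulation into one stateful reverse loop; B decomposes it into a backward fill pass producing the value sequence, a list of clamped per-step deltas from consecutive pairs, and a prefix-sum pass that assigns the running totals.
-- outside the precondition, e.g. on clean_incrementing_reverse({}, 0): A raises ValueError, B raises ValueError
import Mathlib
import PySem

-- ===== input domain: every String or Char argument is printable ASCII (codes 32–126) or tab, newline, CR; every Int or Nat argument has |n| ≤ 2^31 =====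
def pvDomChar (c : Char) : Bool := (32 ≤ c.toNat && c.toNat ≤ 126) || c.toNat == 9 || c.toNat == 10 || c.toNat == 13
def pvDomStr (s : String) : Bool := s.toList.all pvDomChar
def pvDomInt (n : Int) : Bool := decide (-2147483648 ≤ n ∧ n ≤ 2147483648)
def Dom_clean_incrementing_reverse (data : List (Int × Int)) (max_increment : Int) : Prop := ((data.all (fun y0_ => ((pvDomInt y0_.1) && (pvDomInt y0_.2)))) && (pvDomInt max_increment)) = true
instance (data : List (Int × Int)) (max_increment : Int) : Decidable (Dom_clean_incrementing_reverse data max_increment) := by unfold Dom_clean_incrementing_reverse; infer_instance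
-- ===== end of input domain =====

-- B replaces A's fused stateful reverse loop by a backward fill pass, a clamped-delta list and a prefix-sum pass; alternative decomposition, same cost.


-- ===== PORT A =====
-- A's loop body: state (increment, last, new_data); one step of 'for index in range(0, length)'
def cirStepA (data : List (Int × Int)) (max_increment L : Int)
    (st : Int × Int × PySem.Dict Int Int) (index : Int) : Int × Int × PySem.Dict Int Int :=
  let increment := st.1
  let last := st.2.1
  let new_data := st.2.2
  let rindex := L - index - 1
  let nxt := (PySem.Dict.mk data).getD rindex last
  let increment :=
    if nxt ≥ last then
      if max_increment > 0 ∧ nxt - last > max_increment then increment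
      else increment + (nxt - last)
    else increment
  (increment, nxt, new_data.insert rindex increment)

def clean_incrementing_reverse (data : List (Int × Int)) (max_increment : Int) : List (Int × Int) :=
  match PySem.List.max? (data.map Prod.fst) (fun x => x) with
  | none => []        -- max({}) raises ValueError: excluded by Pre_
  | some m =>
    let length := m + 1
    match (PySem.Dict.mk data).get? (length - 1) with
    | none => []      -- data[length-1] raises KeyError (unreachable: length-1 is the max key)
    | some last0 =>
      ((PySem.List.pyRange 0 length 1).foldl (cirStepA data max_increment length)
        (0, last0, PySem.Dict.empty)).2.2.items

-- ===== PORT B =====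
-- B's pass-1 body: state (prev, vals); one step of 'for rindex in range(length-1, -1, -1)'
def cirStepFill (data : List (Int × Int)) (st : Int × List Int) (rindex : Int) : Int × List Int :=
  let prev := (PySem.Dict.mk data).getD rindex st.1
  (prev, st.2 ++ [prev])

-- B's pass-2 body: state (total, new_data); one step of 'for i, d in enumerate(deltas)'
def cirStepAcc (L : Int) (st : Int × PySem.Dict Int Int) (id : Int × Int) : Int × PySem.Dict Int Int :=
  let total := st.1 + id.2
  (total, st.2.insert (L - 1 - id.1) total)

def clean_incrementing_reverse_alt (data : List (Int × Int)) (max_increment : Int) : List (Int × Int) :=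
  match PySem.List.max? (data.map Prod.fst) (fun x => x) with
  | none => []        -- max({}) raises ValueError: excluded by Pre_
  | some m =>
    let length := m + 1
    match (PySem.Dict.mk data).get? (length - 1) with
    | none => []      -- data[length-1] raises KeyError (unreachable)
    | some p0 =>
      let vals := ((PySem.List.pyRange (length - 1) (-1) (-1)).foldl (cirStepFill data) (p0, [])).2
      let deltas := ((p0 :: vals).zip vals).map (fun ab =>
        if ab.2 ≥ ab.1 ∧ (max_increment ≤ 0 ∨ ab.2 - ab.1 ≤ max_increment) then ab.2 - ab.1 else 0)
      ((PySem.List.enumerate deltas 0).foldl (cirStepAcc length) (0, PySem.Dict.empty)).2.items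

-- ===== PRECONDITION & SPEC =====
-- Pre_ excludes only the empty dict, on which A raises ValueError (max of an empty sequence).
def Pre_clean_incrementing_reverse (data : List (Int × Int)) (max_increment : Int) : Prop := data ≠ []
instance (data : List (Int × Int)) (max_increment : Int) : Decidable (Pre_clean_incrementing_reverse data max_increment) := by unfold Pre_clean_incrementing_reverse; infer_instance
def pvWitness_clean_incrementing_reverse : (List (Int × Int)) × Int := ([(2, 5), (0, 1)], 0)

def Spec_clean_incrementing_reverse (data : List (Int × Int)) (max_increment : Int) (out : List (Int × Int)) : Prop := out = clean_incrementing_reverse_alt data max_increment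
instance (data : List (Int × Int)) (max_increment : Int) (out : List (Int × Int)) : Decidable (Spec_clean_incrementing_reverse data max_increment out) := by unfold Spec_clean_incrementing_reverse; infer_instance

-- ===== CLAIM (what is proved, stated in full; the proofs are below) =====
def Claim_equal_clean_incrementing_reverse : Prop := ∀ (data : List (Int × Int)) (max_increment : Int), Dom_clean_incrementing_reverse data max_increment → Pre_clean_incrementing_reverse data max_increment → Spec_clean_incrementing_reverse data max_increment (clean_incrementing_reverse data max_increment)

-- ===== LEMMAS AND PROOFS =====

-- the common clamped delta
def cirDelta (mi p v : Int) : Int :=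
  if v ≥ p ∧ (mi ≤ 0 ∨ v - p ≤ mi) then v - p else 0

-- reference output: pairs (rindex, running total) along a list of rindices
def cirOut (data : List (Int × Int)) (mi : Int) : List Int → Int → Int → List (Int × Int)
  | [], _, _ => []
  | r :: rs, inc, p =>
    let v := (PySem.Dict.mk data).getD r p
    (r, inc + cirDelta mi p v) :: cirOut data mi rs (inc + cirDelta mi p v) v

-- the filled value sequence (B's vals)
def cirFill (data : List (Int × Int)) : List Int → Int → List Int
  | [], _ => []
  | r :: rs, p =>
    let v := (PySem.Dict.mk data).getD r p
    v :: cirFill data rs v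

-- the delta sequence
def cirDeltas (data : List (Int × Int)) (mi : Int) : List Int → Int → List Int
  | [], _ => []
  | r :: rs, p =>
    let v := (PySem.Dict.mk data).getD r p
    cirDelta mi p v :: cirDeltas data mi rs v

lemma cirDelta_eq (mi p v inc : Int) :
    (if v ≥ p then if mi > 0 ∧ v - p > mi then inc else inc + (v - p) else inc)
      = inc + cirDelta mi p v := by
  unfold cirDelta; split_ifs <;> omega

lemma cirStepA_inc (data : List (Int × Int)) (mi L : Int) (st : Int × Int × PySem.Dict Int Int)
    (index : Int) :
    cirStepA data mi L st index =
      (st.1 + cirDelta mi st.2.1 ((PySem.Dict.mk data).getD (L - index - 1) st.2.1),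
       (PySem.Dict.mk data).getD (L - index - 1) st.2.1,
       st.2.2.insert (L - index - 1)
         (st.1 + cirDelta mi st.2.1 ((PySem.Dict.mk data).getD (L - index - 1) st.2.1))) := by
  simp only [cirStepA]
  rw [cirDelta_eq]

-- A's fold over a fresh nodup rindex list appends exactly cirOut
lemma cirA_items (data : List (Int × Int)) (mi L : Int) :
    ∀ (rs : List Int) (inc p : Int) (nd : PySem.Dict Int Int),
      nd.keys.Nodup → (∀ r ∈ rs, nd.contains r = false) → rs.Nodup →
      ((rs.foldl (fun st r => cirStepA data mi L st (L - 1 - r)) (inc, p, nd)).2.2).items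
        = nd.items ++ cirOut data mi rs inc p := by
  intro rs
  induction rs with
  | nil => intro inc p nd _ _ _; simp [cirOut]
  | cons r rs ih =>
    intro inc p nd hnodup hfresh hns
    have hr : L - (L - 1 - r) - 1 = r := by ring
    have hfr : nd.contains r = false := hfresh r (List.mem_cons_self)
    simp only [List.foldl_cons]
    rw [cirStepA_inc, hr]
    rw [ih _ _ _ (by
        simpa [PySem.Dict.keys_insert_of_not_contains _ _ hfr] using
          List.Nodup.append hnodup (List.nodup_singleton r)
            (by simpa [List.disjoint_singleton] using
              (PySem.Dict.contains_iff_mem_keys nd r).not.mp (by simp [hfr])))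
      (by
        intro r' hr'
        have hne : (r' == r) = false :=
          beq_eq_false_iff_ne.mpr (fun h => (List.nodup_cons.mp hns).1 (h ▸ hr'))
        simp [PySem.Dict.contains_insert, hne, hfresh r' (List.mem_cons_of_mem _ hr')])
      (List.nodup_cons.mp hns).2]
    simp [PySem.Dict.items_insert_of_not_contains _ _ hfr, cirOut]

-- B's pass-1 fold computes cirFill
lemma cirB_fill (data : List (Int × Int)) :
    ∀ (rs : List Int) (p : Int) (acc : List Int),
      (rs.foldl (cirStepFill data) (p, acc)).2 = acc ++ cirFill data rs p := by
  intro rs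
  induction rs with
  | nil => intro p acc; simp [cirFill]
  | cons r rs ih => intro p acc; simp [cirStepFill, cirFill, ih]

-- per-step deltas of a value sequence seeded with p
def cirD2 (mi : Int) : Int → List Int → List Int
  | _, [] => []
  | p, v :: vs => cirDelta mi p v :: cirD2 mi v vs

lemma cirZip_deltas (mi : Int) :
    ∀ (vs : List Int) (p : Int),
      (((p :: vs).zip vs).map (fun ab =>
          if ab.2 ≥ ab.1 ∧ (mi ≤ 0 ∨ ab.2 - ab.1 ≤ mi) then ab.2 - ab.1 else 0))
        = cirD2 mi p vs := by
  intro vs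
  induction vs with
  | nil => intro p; simp [cirD2]
  | cons v vs ih => intro p; simp only [List.zip_cons_cons, List.map_cons, cirD2, cirDelta, ih v]

-- consecutive-pair deltas of the filled sequence are cirDeltas
lemma cirB_deltas (data : List (Int × Int)) (mi : Int) :
    ∀ (rs : List Int) (p : Int),
      cirD2 mi p (cirFill data rs p) = cirDeltas data mi rs p := by
  intro rs
  induction rs with
  | nil => intro p; simp [cirFill, cirDeltas, cirD2]
  | cons r rs ih => intro p; simp only [cirFill, cirDeltas, cirD2, ih]

-- accumulated pairs built by B's pass 2, keyed k, k-1, …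
def cirAcc (k : Int) : List Int → Int → List (Int × Int)
  | [], _ => []
  | d :: ds, tot => (k, tot + d) :: cirAcc (k - 1) ds (tot + d)

-- B's pass-2 fold over the enumerated deltas appends exactly cirAcc
lemma cirB_acc (L : Int) :
    ∀ (ds : List Int) (s : Int) (tot : Int) (nd : PySem.Dict Int Int),
      nd.keys.Nodup → (∀ k ∈ nd.keys, L - 1 - s < k) →
      (((PySem.List.enumerate ds s).foldl (cirStepAcc L) (tot, nd)).2).items
        = nd.items ++ cirAcc (L - 1 - s) ds tot := by
  intro ds
  induction ds with
  | nil => intro s tot nd _ _; simp [PySem.List.enumerate_nil, cirAcc]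
  | cons d ds ih =>
    intro s tot nd hnodup hgt
    have hfr : nd.contains (L - 1 - s) = false := by
      by_contra h
      have : L - 1 - s ∈ nd.keys :=
        (PySem.Dict.contains_iff_mem_keys nd (L - 1 - s)).mp (by simpa using h)
      exact absurd (hgt _ this) (by omega)
    simp only [PySem.List.enumerate_cons, List.foldl_cons, cirStepAcc]
    rw [ih (s + 1) (tot + d) _ (by
        simpa [PySem.Dict.keys_insert_of_not_contains _ _ hfr] using
          List.Nodup.append hnodup (List.nodup_singleton _)
            (by simpa [List.disjoint_singleton] using
              (PySem.Dict.contains_iff_mem_keys nd (L - 1 - s)).not.mp (by simp [hfr])))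
      (by
        intro k hk
        rw [PySem.Dict.keys_insert_of_not_contains _ _ hfr] at hk
        rcases List.mem_append.mp hk with h | h
        · have := hgt k h; omega
        · simp at h; omega)]
    simp [PySem.Dict.items_insert_of_not_contains _ _ hfr, cirAcc]
    ring_nf

-- over the countdown range, cirAcc of the deltas is cirOut
lemma cirAcc_eq_out (data : List (Int × Int)) (mi : Int) :
    ∀ (n : Nat) (t : Int), (t + 1).toNat = n → ∀ (tot p : Int),
      cirAcc t (cirDeltas data mi (PySem.List.pyRange t (-1) (-1)) p) tot
        = cirOut data mi (PySem.List.pyRange t (-1) (-1)) tot p := by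
  intro n
  induction n with
  | zero =>
    intro t ht tot p
    rw [PySem.List.pyRange_neg_one_eq_nil (by omega)]
    simp [cirDeltas, cirAcc, cirOut]
  | succ n ih =>
    intro t ht tot p
    rw [PySem.List.pyRange_neg_one_cons (by omega)]
    simp only [cirDeltas, cirAcc, cirOut]
    rw [ih (t - 1) (by omega)]

-- A's rindex rewrite: fold over range(0, L) with rindex = L-index-1 is a fold over the countdown range
lemma cirA_range (L : Int) (f : (Int × Int × PySem.Dict Int Int) → Int → (Int × Int × PySem.Dict Int Int))
    (init : Int × Int × PySem.Dict Int Int) :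
    (PySem.List.pyRange 0 L 1).foldl f init
      = (PySem.List.pyRange (L - 1) (-1) (-1)).foldl (fun st r => f st (L - 1 - r)) init := by
  rw [PySem.List.pyRange_one, PySem.List.pyRange_neg_one, List.foldl_map, List.foldl_map]
  have h1 : (L - 0).toNat = (L - 1 - -1).toNat := by omega
  rw [h1]
  congr 1
  funext st k
  congr 1
  omega

lemma cirRange_nodup (t : Int) : (PySem.List.pyRange t (-1) (-1)).Nodup := by
  rw [PySem.List.pyRange_neg_one_eq_reverse]
  exact List.nodup_reverse.mpr (PySem.List.nodup_pyRange_one _ _)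

-- ===== VERDICT (by name: the statement is the Claim_ definition above) =====
theorem clean_incrementing_reverse_spec : Claim_equal_clean_incrementing_reverse := by
  intro data mi _ _
  unfold Spec_clean_incrementing_reverse clean_incrementing_reverse clean_incrementing_reverse_alt
  cases hmax : PySem.List.max? (data.map Prod.fst) (fun x => x) with
  | none => rfl
  | some m =>
    simp only
    cases hget : (PySem.Dict.mk data).get? (m + 1 - 1) with
    | none => rfl
    | some p0 =>
      simp only
      rw [cirA_range, cirA_items data mi (m + 1) _ 0 p0 PySem.Dict.empty
            (by simp) (by simp) (cirRange_nodup _),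
          cirB_fill, List.nil_append, cirZip_deltas, cirB_deltas,
          cirB_acc (m + 1) _ 0 0 PySem.Dict.empty (by simp) (by simp)]
      have := cirAcc_eq_out data mi (m + 1 - 1 + 1).toNat (m + 1 - 1) rfl 0 p0
      simpa using this.symm
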